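-- pv_equiv track=rewrite | github.com/dxe4/misc | cuda_c344/hostage_rescue.py | should_scale
-- ===== SOURCE A (Python) =====
-- from itertools import product
--
-- opposite = {
--     'UD': (False, True),
--     'RL': (True, False),
--     'DU': (False, True),
--     'LR': (True, False),
-- }
--
-- def should_scale(BOMB_DIR, previous):
--     if previous is None:
--         return (True, True)
--     else:
--         result = []
--         for pair in product(BOMB_DIR, previous):
--             try:
--                 result.append(opposite[''.join(pair)])
--             except KeyError:
--                 pass  # Not opposite
--         if not result:
--             return (True, True)
--         # This is probably an itertools job
--         x_opposite = bool([i[0] for i in result if i[0] is False])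
--         y_opposite = bool([i[1] for i in result if i[1] is False])
--         return x_opposite, y_opposite
-- ===== SOURCE B (Python) =====
-- def should_scale(BOMB_DIR, previous):
--     if previous is None:
--         return (True, True)
--     v = ('U' in BOMB_DIR and 'D' in previous) or ('D' in BOMB_DIR and 'U' in previous)
--     h = ('R' in BOMB_DIR and 'L' in previous) or ('L' in BOMB_DIR and 'R' in previous)
--     if not v and not h:
--         return (True, True)
--     return (v, h)
-- ===== Notes on version B (the rewrite author's own statement) =====
-- stated objective: simpler
-- what changed: Replaces the itertools.product loop, the opposite dict and the result-list filtering with four direct membership tests computing the vertical/horizontal-opposite booleans.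
import Mathlib
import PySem

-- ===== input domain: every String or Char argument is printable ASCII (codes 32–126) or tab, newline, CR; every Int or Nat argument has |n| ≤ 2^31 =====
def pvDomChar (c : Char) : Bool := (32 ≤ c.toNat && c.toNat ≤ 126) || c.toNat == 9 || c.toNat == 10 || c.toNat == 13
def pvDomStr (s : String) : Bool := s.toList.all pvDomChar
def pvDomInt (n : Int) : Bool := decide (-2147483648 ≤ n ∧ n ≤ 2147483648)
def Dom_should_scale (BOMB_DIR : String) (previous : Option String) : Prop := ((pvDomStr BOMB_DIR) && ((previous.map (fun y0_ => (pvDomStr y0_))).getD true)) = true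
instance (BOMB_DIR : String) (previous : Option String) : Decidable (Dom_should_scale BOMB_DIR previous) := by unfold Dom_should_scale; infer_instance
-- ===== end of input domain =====

-- B replaces A's itertools.product loop over the `opposite` dict and the result-list
-- filtering with four direct substring-membership tests (simpler, same return values).


-- ===== PORT A =====
-- the module-level `opposite` dict
def oppositeDict : PySem.Dict String (Bool × Bool) :=
  PySem.Dict.ofList [("UD",(false,true)),("RL",(true,false)),("DU",(false,true)),("LR",(true,false))]

-- try: result.append(opposite[key]) except KeyError: pass
def pyTryAppend (acc : List (Bool × Bool)) (o : Option (Bool × Bool)) : List (Bool × Bool) :=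
  match o with
  | some v => acc ++ [v]
  | none => acc

def should_scale (BOMB_DIR : String) (previous : Option String) : Bool × Bool :=
  match previous with
  | none => (true, true)
  | some prev =>
    -- result built by the `for pair in product(BOMB_DIR, previous)` loop
    let result := (BOMB_DIR.toList.flatMap (fun a => prev.toList.map (fun b => (a, b)))).foldl
      (fun acc p => pyTryAppend acc (oppositeDict.get? (String.ofList [p.1, p.2]))) []
    if result = [] then (true, true)
    else
      -- x_opposite = bool([i[0] for i in result if i[0] is False]); likewise y_opposite
      (!((result.filter (fun i => i.1 == false)).map (fun i => i.1)).isEmpty,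
       !((result.filter (fun i => i.2 == false)).map (fun i => i.2)).isEmpty)

-- ===== PORT B =====
def should_scale_alt (BOMB_DIR : String) (previous : Option String) : Bool × Bool :=
  match previous with
  | none => (true, true)
  | some prev =>
    let v := (PySem.Str.isIn "U" BOMB_DIR && PySem.Str.isIn "D" prev) ||
             (PySem.Str.isIn "D" BOMB_DIR && PySem.Str.isIn "U" prev)
    let h := (PySem.Str.isIn "R" BOMB_DIR && PySem.Str.isIn "L" prev) ||
             (PySem.Str.isIn "L" BOMB_DIR && PySem.Str.isIn "R" prev)
    if !v && !h then (true, true) else (v, h)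

-- ===== PRECONDITION & SPEC =====
def Spec_should_scale (BOMB_DIR : String) (previous : Option String) (out : Bool × Bool) : Prop := out = should_scale_alt BOMB_DIR previous
instance (BOMB_DIR : String) (previous : Option String) (out : Bool × Bool) : Decidable (Spec_should_scale BOMB_DIR previous out) := by unfold Spec_should_scale; infer_instance

-- ===== CLAIM (what is proved, stated in full; the proofs are below) =====
def Claim_equal_should_scale : Prop := ∀ (BOMB_DIR : String) (previous : Option String), Dom_should_scale BOMB_DIR previous → Spec_should_scale BOMB_DIR previous (should_scale BOMB_DIR previous)

-- ===== LEMMAS AND PROOFS =====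

theorem strEqOfList (a b : Char) (s : String) : (s == String.ofList [a,b]) = (s.toList == [a,b]) := by
  by_cases hs : s.toList = [a,b]
  · have h1 : s = String.ofList [a,b] := by
      apply String.ext; simpa using hs
    simp [h1]
  · have h1 : s ≠ String.ofList [a,b] := by
      intro hc; apply hs; rw [hc]; simp
    simp [h1, hs]

theorem oppKey_eq (a b : Char) : oppositeDict.get? (String.ofList [a, b]) =
  if a = 'U' ∧ b = 'D' then some (false, true)
  else if a = 'R' ∧ b = 'L' then some (true, false)
  else if a = 'D' ∧ b = 'U' then some (false, true)
  else if a = 'L' ∧ b = 'R' then some (true, false)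
  else none := by
  have h : oppositeDict.items = [("UD",(false,true)),("RL",(true,false)),("DU",(false,true)),("LR",(true,false))] := by decide
  simp only [PySem.Dict.get?, h, List.find?_cons, strEqOfList, List.find?_nil]
  simp only [show ("UD":String).toList = ['U','D'] from rfl, show ("RL":String).toList = ['R','L'] from rfl,
    show ("DU":String).toList = ['D','U'] from rfl, show ("LR":String).toList = ['L','R'] from rfl]
  split_ifs <;> (repeat' split) <;> simp_all [@eq_comm Char]

theorem foldl_opt_append {alpha beta : Type} (g : alpha → Option beta)
    (app : List beta → Option beta → List beta)
    (happ_some : ∀ acc v, app acc (some v) = acc ++ [v])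
    (happ_none : ∀ acc, app acc none = acc)
    (l : List alpha) (acc : List beta) :
    l.foldl (fun acc p => app acc (g p)) acc = acc ++ l.filterMap g := by
  induction l generalizing acc with
  | nil => simp
  | cons x xs ih =>
    rw [List.foldl_cons, List.filterMap_cons]
    cases hg : g x
    · rw [happ_none, ih]
    · rw [happ_some, ih]
      simp

-- the result list of port A, as a filterMap over the cartesian product
def resultOf (L P : List Char) : List (Bool × Bool) :=
  (L.flatMap (fun a => P.map (fun b => (a, b)))).filterMap
    (fun p => oppositeDict.get? (String.ofList [p.1, p.2]))

theorem mem_resultOf (L P : List Char) (x : Bool × Bool) :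
    x ∈ resultOf L P ↔ ∃ a ∈ L, ∃ b ∈ P, oppositeDict.get? (String.ofList [a, b]) = some x := by
  simp only [resultOf, List.mem_filterMap, List.mem_flatMap, List.mem_map]
  constructor
  · rintro ⟨p, ⟨a, ha, b, hb, rfl⟩, hg⟩; exact ⟨a, ha, b, hb, hg⟩
  · rintro ⟨a, ha, b, hb, hg⟩; exact ⟨(a,b), ⟨a, ha, b, hb, rfl⟩, hg⟩

theorem resultOf_shape (L P : List Char) (x : Bool × Bool) (hx : x ∈ resultOf L P) :
    x = (false, true) ∨ x = (true, false) := by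
  rw [mem_resultOf] at hx
  obtain ⟨a, _, b, _, hg⟩ := hx
  rw [oppKey_eq] at hg
  split_ifs at hg <;> simp_all

theorem vert_mem (L P : List Char) :
    (false, true) ∈ resultOf L P ↔ (('U' ∈ L ∧ 'D' ∈ P) ∨ ('D' ∈ L ∧ 'U' ∈ P)) := by
  rw [mem_resultOf]
  constructor
  · rintro ⟨a, ha, b, hb, hg⟩
    rw [oppKey_eq] at hg
    split_ifs at hg <;> simp_all
  · rintro (⟨hU, hD⟩ | ⟨hD, hU⟩)
    · exact ⟨'U', hU, 'D', hD, by rw [oppKey_eq]; simp⟩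
    · exact ⟨'D', hD, 'U', hU, by rw [oppKey_eq]; simp⟩

theorem horiz_mem (L P : List Char) :
    (true, false) ∈ resultOf L P ↔ (('R' ∈ L ∧ 'L' ∈ P) ∨ ('L' ∈ L ∧ 'R' ∈ P)) := by
  rw [mem_resultOf]
  constructor
  · rintro ⟨a, ha, b, hb, hg⟩
    rw [oppKey_eq] at hg
    split_ifs at hg <;> simp_all
  · rintro (⟨hR, hL⟩ | ⟨hL, hR⟩)
    · exact ⟨'R', hR, 'L', hL, by rw [oppKey_eq]; simp⟩
    · exact ⟨'L', hL, 'R', hR, by rw [oppKey_eq]; simp⟩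

theorem resultOf_eq_nil_iff (L P : List Char) :
    resultOf L P = [] ↔ ¬ (('U' ∈ L ∧ 'D' ∈ P) ∨ ('D' ∈ L ∧ 'U' ∈ P)) ∧
                        ¬ (('R' ∈ L ∧ 'L' ∈ P) ∨ ('L' ∈ L ∧ 'R' ∈ P)) := by
  constructor
  · intro h
    constructor
    · intro hv; rw [← vert_mem L P] at hv; simp [h] at hv
    · intro hh; rw [← horiz_mem L P] at hh; simp [h] at hh
  · rintro ⟨hv, hh⟩
    rcases hr : resultOf L P with _ | ⟨x, xs⟩
    · rfl
    · exfalso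
      have hx : x ∈ resultOf L P := by rw [hr]; simp
      rcases resultOf_shape L P x hx with rfl | rfl
      · exact hv ((vert_mem L P).mp hx)
      · exact hh ((horiz_mem L P).mp hx)

theorem isIn_singleton (c : Char) (s : String) :
    PySem.Str.isIn (String.ofList [c]) s = decide (c ∈ s.toList) := by
  have hb : PySem.Str.isIn (String.ofList [c]) s = PySem.Chars.isIn [c] s.toList := by
    simp
  rw [hb]
  by_cases hm : c ∈ s.toList
  · rw [(PySem.Chars.isIn_iff_infix _ _).mpr ((List.singleton_infix_iff c s.toList).mpr hm)]
    simp [hm]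
  · rw [(PySem.Chars.isIn_eq_false_iff _ _).mpr (by rw [List.singleton_infix_iff]; exact hm)]
    simp [hm]

theorem filter_fst_ne_nil (L P : List Char) (h : (false, true) ∈ resultOf L P) :
    ((resultOf L P).filter (fun i => i.1 == false)) ≠ [] := by
  intro hnil
  have hmem : (false, true) ∈ (resultOf L P).filter (fun i => i.1 == false) :=
    List.mem_filter.mpr ⟨h, by rfl⟩
  rw [hnil] at hmem
  simp at hmem

theorem filter_snd_ne_nil (L P : List Char) (h : (true, false) ∈ resultOf L P) :
    ((resultOf L P).filter (fun i => i.2 == false)) ≠ [] := by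
  intro hnil
  have hmem : (true, false) ∈ (resultOf L P).filter (fun i => i.2 == false) :=
    List.mem_filter.mpr ⟨h, by rfl⟩
  rw [hnil] at hmem
  simp at hmem

theorem resultOf_def (L P : List Char) :
    (L.flatMap (fun a => P.map (fun b => (a, b)))).filterMap
      (fun p => oppositeDict.get? (String.ofList [p.1, p.2])) = resultOf L P := rfl

-- ===== VERDICT (by name: the statement is the Claim_ definition above) =====
theorem should_scale_spec : Claim_equal_should_scale := by
  intro BOMB_DIR previous _
  unfold Spec_should_scale should_scale should_scale_alt
  cases previous with
  | none => rfl
  | some prev =>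
    simp only [foldl_opt_append (fun p : Char × Char => oppositeDict.get? (String.ofList [p.1, p.2]))
        pyTryAppend (fun acc v => rfl) (fun acc => rfl), List.nil_append, resultOf_def,
      isIn_singleton 'U' BOMB_DIR, isIn_singleton 'D' prev, isIn_singleton 'D' BOMB_DIR,
      isIn_singleton 'U' prev, isIn_singleton 'R' BOMB_DIR, isIn_singleton 'L' prev,
      isIn_singleton 'L' BOMB_DIR, isIn_singleton 'R' prev]
    set L := BOMB_DIR.toList with hL
    set P := prev.toList with hP
    by_cases hV : (('U' ∈ L ∧ 'D' ∈ P) ∨ ('D' ∈ L ∧ 'U' ∈ P)) <;>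
      by_cases hH : (('R' ∈ L ∧ 'L' ∈ P) ∨ ('L' ∈ L ∧ 'R' ∈ P))
    · -- both opposite pairs present
      have hne : resultOf L P ≠ [] := by rw [Ne, resultOf_eq_nil_iff]; tauto
      have hx := filter_fst_ne_nil L P ((vert_mem L P).mpr hV)
      have hy := filter_snd_ne_nil L P ((horiz_mem L P).mpr hH)
      have hv : (decide ('U' ∈ L) && decide ('D' ∈ P) || decide ('D' ∈ L) && decide ('U' ∈ P)) = true := by
        simp only [Bool.or_eq_true, Bool.and_eq_true, decide_eq_true_eq]; exact hV
      have hh : (decide ('R' ∈ L) && decide ('L' ∈ P) || decide ('L' ∈ L) && decide ('R' ∈ P)) = true := by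
        simp only [Bool.or_eq_true, Bool.and_eq_true, decide_eq_true_eq]; exact hH
      have hxe : (((resultOf L P).filter (fun i => i.1 == false)).map (fun i => i.1)).isEmpty = false :=
        List.isEmpty_eq_false_iff.mpr (fun hm => hx (List.map_eq_nil_iff.mp hm))
      have hye : (((resultOf L P).filter (fun i => i.2 == false)).map (fun i => i.2)).isEmpty = false :=
        List.isEmpty_eq_false_iff.mpr (fun hm => hy (List.map_eq_nil_iff.mp hm))
      rw [if_neg hne, hv, hh, hxe, hye]
      simp
    · -- vertical opposites only
      have hne : resultOf L P ≠ [] := by rw [Ne, resultOf_eq_nil_iff]; tauto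
      have hx := filter_fst_ne_nil L P ((vert_mem L P).mpr hV)
      have hy : ((resultOf L P).filter (fun i => i.2 == false)) = [] := by
        rw [List.filter_eq_nil_iff]
        intro x hx'
        rcases resultOf_shape L P x hx' with rfl | rfl
        · simp
        · exact absurd ((horiz_mem L P).mp hx') hH
      have hv : (decide ('U' ∈ L) && decide ('D' ∈ P) || decide ('D' ∈ L) && decide ('U' ∈ P)) = true := by
        simp only [Bool.or_eq_true, Bool.and_eq_true, decide_eq_true_eq]; exact hV
      have hh : (decide ('R' ∈ L) && decide ('L' ∈ P) || decide ('L' ∈ L) && decide ('R' ∈ P)) = false := by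
        rw [Bool.eq_false_iff]
        simp only [ne_eq, Bool.or_eq_true, Bool.and_eq_true, decide_eq_true_eq]; exact hH
      have hxe : (((resultOf L P).filter (fun i => i.1 == false)).map (fun i => i.1)).isEmpty = false :=
        List.isEmpty_eq_false_iff.mpr (fun hm => hx (List.map_eq_nil_iff.mp hm))
      have hye : (((resultOf L P).filter (fun i => i.2 == false)).map (fun i => i.2)).isEmpty = true := by
        rw [hy]; rfl
      rw [if_neg hne, hv, hh, hxe, hye]
      simp
    · -- horizontal opposites only
      have hne : resultOf L P ≠ [] := by rw [Ne, resultOf_eq_nil_iff]; tauto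
      have hy := filter_snd_ne_nil L P ((horiz_mem L P).mpr hH)
      have hx : ((resultOf L P).filter (fun i => i.1 == false)) = [] := by
        rw [List.filter_eq_nil_iff]
        intro x hx'
        rcases resultOf_shape L P x hx' with rfl | rfl
        · exact absurd ((vert_mem L P).mp hx') hV
        · simp
      have hv : (decide ('U' ∈ L) && decide ('D' ∈ P) || decide ('D' ∈ L) && decide ('U' ∈ P)) = false := by
        rw [Bool.eq_false_iff]
        simp only [ne_eq, Bool.or_eq_true, Bool.and_eq_true, decide_eq_true_eq]; exact hV
      have hh : (decide ('R' ∈ L) && decide ('L' ∈ P) || decide ('L' ∈ L) && decide ('R' ∈ P)) = true := by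
        simp only [Bool.or_eq_true, Bool.and_eq_true, decide_eq_true_eq]; exact hH
      have hxe : (((resultOf L P).filter (fun i => i.1 == false)).map (fun i => i.1)).isEmpty = true := by
        rw [hx]; rfl
      have hye : (((resultOf L P).filter (fun i => i.2 == false)).map (fun i => i.2)).isEmpty = false :=
        List.isEmpty_eq_false_iff.mpr (fun hm => hy (List.map_eq_nil_iff.mp hm))
      rw [if_neg hne, hv, hh, hxe, hye]
      simp
    · -- neither: the (True, True) fallback on both sides
      have hnil : resultOf L P = [] := (resultOf_eq_nil_iff L P).mpr ⟨hV, hH⟩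
      have hv : (decide ('U' ∈ L) && decide ('D' ∈ P) || decide ('D' ∈ L) && decide ('U' ∈ P)) = false := by
        rw [Bool.eq_false_iff]
        simp only [ne_eq, Bool.or_eq_true, Bool.and_eq_true, decide_eq_true_eq]; exact hV
      have hh : (decide ('R' ∈ L) && decide ('L' ∈ P) || decide ('L' ∈ L) && decide ('R' ∈ P)) = false := by
        rw [Bool.eq_false_iff]
        simp only [ne_eq, Bool.or_eq_true, Bool.and_eq_true, decide_eq_true_eq]; exact hH
      rw [if_pos hnil, hv, hh]
      simp
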